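-- pv_equiv track=rewrite | github.com/LuisWollenschneider/AdventOfCode | 2024/day_21.py | crosses_space
-- ===== SOURCE A (Python) =====
-- def crosses_space(pos, dirs, space):
--     for d in dirs:
--         if d == "^":
--             pos = (pos[0], pos[1] - 1)
--         elif d == "v":
--             pos = (pos[0], pos[1] + 1)
--         elif d == "<":
--             pos = (pos[0] - 1, pos[1])
--         elif d == ">":
--             pos = (pos[0] + 1, pos[1])
--         if pos == space:
--             return True
--     return False
-- ===== SOURCE B (Python) =====
-- DELTAS = {"^": (0, -1), "v": (0, 1), "<": (-1, 0), ">": (1, 0)}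
--
-- def crosses_space(pos, dirs, space):
--     # Divide and conquer: the path crosses `space` iff the first half does,
--     # or the second half does when started from the midpoint position, which
--     # is obtained directly from character counts (net displacement of a
--     # segment = (#'>' - #'<', #'v' - #'^')), not by stepping through it.
--     if len(dirs) == 0:
--         return False
--     if len(dirs) == 1:
--         dx, dy = DELTAS.get(dirs, (0, 0))
--         return (pos[0] + dx, pos[1] + dy) == space
--     mid = len(dirs) // 2
--     left = dirs[:mid]
--     if crosses_space(pos, left, space):
--         return True
--     mid_pos = (pos[0] + left.count(">") - left.count("<"),
--                pos[1] + left.count("v") - left.count("^"))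
--     return crosses_space(mid_pos, dirs[mid:], space)
-- ===== Notes on version B (the rewrite author's own statement) =====
-- stated objective: alternative
-- what changed: Replaces A's sequential step-and-check simulation with a divide-and-conquer recursion: check the left half, compute the midpoint position in closed form from character counts (#'>'-#'<', #'v'-#'^'), and recurse on the right half from there.
import Mathlib
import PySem

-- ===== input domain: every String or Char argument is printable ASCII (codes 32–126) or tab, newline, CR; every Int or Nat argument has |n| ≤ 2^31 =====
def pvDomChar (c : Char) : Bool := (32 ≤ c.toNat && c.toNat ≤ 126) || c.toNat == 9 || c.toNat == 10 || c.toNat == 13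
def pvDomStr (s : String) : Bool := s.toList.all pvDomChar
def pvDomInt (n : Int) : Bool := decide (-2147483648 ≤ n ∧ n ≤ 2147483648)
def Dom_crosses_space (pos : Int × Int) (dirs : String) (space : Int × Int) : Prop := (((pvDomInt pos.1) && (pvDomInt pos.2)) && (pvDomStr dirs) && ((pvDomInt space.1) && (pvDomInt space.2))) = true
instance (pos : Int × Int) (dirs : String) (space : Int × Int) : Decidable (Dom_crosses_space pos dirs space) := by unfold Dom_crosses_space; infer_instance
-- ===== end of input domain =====

-- B replaces A's sequential step-and-check simulation with divide and conquer:
-- check the left half, jump to the midpoint via character counts, recurse on the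
-- right half; objective: alternative algorithm, same result.

-- ===== PORT A =====
-- A's loop with early return: structural recursion over the characters.
def crossesAuxA (pos : Int × Int) (cs : List Char) (space : Int × Int) : Bool :=
  match cs with
  | [] => false
  | d :: rest =>
    let pos' :=
      if d = '^' then (pos.1, pos.2 - 1)
      else if d = 'v' then (pos.1, pos.2 + 1)
      else if d = '<' then (pos.1 - 1, pos.2)
      else if d = '>' then (pos.1 + 1, pos.2)
      else pos
    if pos' = space then true else crossesAuxA pos' rest space

def crosses_space (pos : Int × Int) (dirs : String) (space : Int × Int) : Bool :=
  crossesAuxA pos dirs.toList space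

-- ===== PORT B =====
-- DELTAS.get(d, (0, 0)) for a one-character string d
def pvDelta (d : Char) : Int × Int :=
  if d = '^' then (0, -1)
  else if d = 'v' then (0, 1)
  else if d = '<' then (-1, 0)
  else if d = '>' then (1, 0)
  else (0, 0)

-- Source B's recursion over the character list; dirs[:mid]/dirs[mid:] with
-- 0 ≤ mid ≤ len are exactly List.take/List.drop.
def crossesAuxB (pos : Int × Int) (cs : List Char) (space : Int × Int) : Bool :=
  if cs.length = 0 then false
  else if _h1 : cs.length = 1 then
    let dd := pvDelta (cs.headI)
    decide ((pos.1 + dd.1, pos.2 + dd.2) = space)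
  else
    let mid := cs.length / 2
    let left := cs.take mid
    if crossesAuxB pos left space then true
    else
      let midPos : Int × Int :=
        (pos.1 + (left.count '>' : Int) - (left.count '<' : Int),
         pos.2 + (left.count 'v' : Int) - (left.count '^' : Int))
      crossesAuxB midPos (cs.drop mid) space
termination_by cs.length
decreasing_by
  · simp only [List.length_take]
    omega
  · simp only [List.length_drop]
    omega

def crosses_space_alt (pos : Int × Int) (dirs : String) (space : Int × Int) : Bool :=
  crossesAuxB pos dirs.toList space

-- ===== PRECONDITION & SPEC =====
def Spec_crosses_space (pos : Int × Int) (dirs : String) (space : Int × Int) (out : Bool) : Prop := out = crosses_space_alt pos dirs space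
instance (pos : Int × Int) (dirs : String) (space : Int × Int) (out : Bool) : Decidable (Spec_crosses_space pos dirs space out) := by unfold Spec_crosses_space; infer_instance

-- ===== CLAIM (what is proved, stated in full; the proofs are below) =====
def Claim_equal_crosses_space : Prop := ∀ (pos : Int × Int) (dirs : String) (space : Int × Int), Dom_crosses_space pos dirs space → Spec_crosses_space pos dirs space (crosses_space pos dirs space)

-- ===== LEMMAS AND PROOFS =====

-- A's one step, named for the lemmas
def pvStepA (pos : Int × Int) (d : Char) : Int × Int :=
  if d = '^' then (pos.1, pos.2 - 1)
  else if d = 'v' then (pos.1, pos.2 + 1)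
  else if d = '<' then (pos.1 - 1, pos.2)
  else if d = '>' then (pos.1 + 1, pos.2)
  else pos

lemma pvStepA_eq_delta (pos : Int × Int) (d : Char) :
    pvStepA pos d = (pos.1 + (pvDelta d).1, pos.2 + (pvDelta d).2) := by
  unfold pvStepA pvDelta
  split_ifs <;> simp <;> omega

-- A on a single character
lemma crossesAuxA_single (pos space : Int × Int) (d : Char) :
    crossesAuxA pos [d] space = decide (pvStepA pos d = space) := by
  show (if pvStepA pos d = space then true else crossesAuxA (pvStepA pos d) [] space)
      = decide (pvStepA pos d = space)
  by_cases h : pvStepA pos d = space <;> simp [h, crossesAuxA]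

-- A on a concatenation: left part, then right part from the endpoint of the left
lemma crossesAuxA_append (l : List Char) :
    ∀ (r : List Char) (pos space : Int × Int),
      crossesAuxA pos (l ++ r) space
        = (crossesAuxA pos l space || crossesAuxA (l.foldl pvStepA pos) r space) := by
  induction l with
  | nil => intro r pos space; simp [crossesAuxA]
  | cons d rest ih =>
      intro r pos space
      simp only [List.cons_append, crossesAuxA, List.foldl]
      have : (if d = '^' then ((pos.1, pos.2 - 1) : Int × Int)
              else if d = 'v' then (pos.1, pos.2 + 1)
              else if d = '<' then (pos.1 - 1, pos.2)
              else if d = '>' then (pos.1 + 1, pos.2)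
              else pos) = pvStepA pos d := rfl
      rw [this]
      by_cases h : pvStepA pos d = space
      · simp [h]
      · simp [h, ih]

-- the endpoint of a segment is a closed form in the character counts
lemma foldl_pvStepA_counts (l : List Char) :
    ∀ (pos : Int × Int),
      l.foldl pvStepA pos
        = (pos.1 + (l.count '>' : Int) - (l.count '<' : Int),
           pos.2 + (l.count 'v' : Int) - (l.count '^' : Int)) := by
  induction l with
  | nil => intro pos; simp
  | cons d rest ih =>
      intro pos
      simp only [List.foldl, ih, List.count_cons]
      unfold pvStepA
      split_ifs <;> simp_all <;> omega

-- B equals A, by strong induction on the length of the character list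
lemma crossesAuxB_eq_A (n : ℕ) :
    ∀ (cs : List Char), cs.length ≤ n →
      ∀ (pos space : Int × Int), crossesAuxB pos cs space = crossesAuxA pos cs space := by
  induction n with
  | zero =>
      intro cs hlen pos space
      have : cs = [] := List.eq_nil_of_length_eq_zero (Nat.le_zero.mp hlen)
      subst this
      simp [crossesAuxB, crossesAuxA]
  | succ n ih =>
      intro cs hlen pos space
      match cs with
      | [] => simp [crossesAuxB, crossesAuxA]
      | [d] =>
          rw [crossesAuxB]
          simp only [List.length_cons, List.length_nil]
          rw [dif_pos trivial]
          simp only [List.headI]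
          rw [crossesAuxA_single]
          simp [pvStepA_eq_delta]
      | d1 :: d2 :: rest =>
          set cs := d1 :: d2 :: rest with hcs
          have h2 : 2 ≤ cs.length := by simp [hcs]
          rw [crossesAuxB]
          rw [if_neg (by omega), dif_neg (by omega)]
          set mid := cs.length / 2 with hmid
          have hmid1 : 1 ≤ mid := by omega
          have hmidlt : mid < cs.length := by omega
          have htake : (cs.take mid).length = mid := by
            simp [List.length_take]; omega
          have hdrop : (cs.drop mid).length = cs.length - mid := by
            simp [List.length_drop]
          have ihl := ih (cs.take mid) (by omega) pos space
          have hsplit : cs.take mid ++ cs.drop mid = cs := List.take_append_drop mid cs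
          conv_rhs => rw [← hsplit]
          rw [crossesAuxA_append]
          simp only []
          rw [ihl]
          by_cases hL : crossesAuxA pos (cs.take mid) space
          · simp [hL]
          · simp only [hL, Bool.false_or]
            rw [ih (cs.drop mid) (by omega), foldl_pvStepA_counts]
            simp

-- ===== VERDICT (by name: the statement is the Claim_ definition above) =====
theorem crosses_space_spec : Claim_equal_crosses_space := by
  intro pos dirs space _
  show crosses_space pos dirs space = crosses_space_alt pos dirs space
  simp only [crosses_space, crosses_space_alt]
  exact (crossesAuxB_eq_A dirs.toList.length dirs.toList le_rfl pos space).symm
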